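-- pv_equiv track=rewrite | github.com/harshad018/AI-Lab | practice/nqueens.py | get_best_neighbour
-- ===== SOURCE A (Python) =====
-- def compute_heurestic(state):
--     h = 0
--     n = len(state)
--
--     for i in range(n):
--         for j in range (i +1 , n):
--             if state[i] == state[j] or abs(state[i] - state[j]) == abs(i - j):
--                 h += 1
--
--
--     return h
--
-- def get_best_neighbour(state):
--     n = len(state)
--     best_state = state[:]
--     min_h = compute_heurestic(state)
--
--     for col in range(n):
--
--         original_row = state[col]
--         for row in range(n):
--             if row != original_row:
--                 state[col] = row
--                 h = compute_heurestic(state)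
--                 if h < min_h:
--                     min_h = h
--                     best_state = state[:]
--         state[col] = original_row
--     return best_state, min_h
-- ===== SOURCE B (Python) =====
-- def get_best_neighbour(state):
--     n = len(state)
--
--     def conflicts(col, v):
--         c = 0
--         for j in range(n):
--             if j != col and (state[j] == v or abs(state[j] - v) == abs(j - col)):
--                 c += 1
--         return c
--
--     base = sum(conflicts(col, state[col]) for col in range(n)) // 2
--     best_state = state[:]
--     min_h = base
--     for col in range(n):
--         own = conflicts(col, state[col])
--         for row in range(n):
--             if row != state[col]:
--                 h = base - own + conflicts(col, row)
--                 if h < min_h: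
--                     min_h = h
--                     best_state = state[:]
--                     best_state[col] = row
--     return best_state, min_h
-- ===== Notes on version B (the rewrite author's own statement) =====
-- stated objective: faster
-- what changed: Instead of recomputing the full O(n^2) heuristic for every single-queen move, B computes the baseline conflict count once and updates it incrementally per move (base - conflicts of the moved queen at its old row + conflicts at the new row), and B never mutates the input list.
import Mathlib
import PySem

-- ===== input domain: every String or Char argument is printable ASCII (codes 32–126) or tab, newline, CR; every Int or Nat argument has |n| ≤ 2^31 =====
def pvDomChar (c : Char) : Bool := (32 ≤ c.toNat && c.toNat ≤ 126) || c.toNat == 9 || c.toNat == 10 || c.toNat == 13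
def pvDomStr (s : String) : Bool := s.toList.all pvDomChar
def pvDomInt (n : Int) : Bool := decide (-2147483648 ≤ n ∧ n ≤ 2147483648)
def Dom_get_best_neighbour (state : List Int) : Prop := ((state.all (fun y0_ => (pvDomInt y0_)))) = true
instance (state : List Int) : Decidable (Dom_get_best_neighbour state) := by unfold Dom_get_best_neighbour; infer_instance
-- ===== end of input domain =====

-- B replaces A's full O(n^2) heuristic recomputation per single-queen move by an incremental
-- update from a baseline conflict count (objective: faster). A temporarily mutates its argument
-- but restores it before returning; B never mutates — the equivalence is about the return value.

-- shared conflict test: state[i] == state[j] or abs(state[i]-state[j]) == abs(i-j)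
def pvCfl (a b : Int) (i j : Nat) : Bool := a == b || ((a - b).natAbs == ((i : Int) - (j : Int)).natAbs)

-- ===== PORT A =====
def compute_heurestic (state : List Int) : Int :=
  let n := state.length
  (List.range n).foldl (fun h i =>
    (List.range' (i + 1) (n - (i + 1))).foldl (fun h j =>
      if pvCfl (state.getD i 0) (state.getD j 0) i j then h + 1 else h) h) 0

def get_best_neighbour (state : List Int) : List Int × Int :=
  let n := state.length
  let res := (List.range n).foldl (fun (acc : List Int × List Int × Int) col =>
      let orig := acc.1.getD col 0
      let inner := (List.range n).foldl (fun (a : List Int × List Int × Int) (row : Nat) =>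
          if (row : Int) ≠ orig then
            let st := a.1.set col (row : Int)
            let h := compute_heurestic st
            if h < a.2.2 then (st, st, h) else (st, a.2.1, a.2.2)
          else a) acc
      (inner.1.set col orig, inner.2.1, inner.2.2))
    (state, state, compute_heurestic state)
  (res.2.1, res.2.2)

-- ===== PORT B =====
-- conflicts(col, v): number of other queens in conflict with a queen at (col, v)
def pvConflicts (state : List Int) (col : Nat) (v : Int) : Int :=
  (List.range state.length).foldl (fun c j =>
    if decide (j ≠ col) && pvCfl (state.getD j 0) v j col then c + 1 else c) 0

def get_best_neighbour_alt (state : List Int) : List Int × Int :=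
  let n := state.length
  let base := PySem.Int.floordiv
    (((List.range n).map (fun col => pvConflicts state col (state.getD col 0))).sum) 2
  (List.range n).foldl (fun (acc : List Int × Int) col =>
    let own := pvConflicts state col (state.getD col 0)
    (List.range n).foldl (fun (a : List Int × Int) (row : Nat) =>
      if (row : Int) ≠ state.getD col 0 then
        let h := base - own + pvConflicts state col (row : Int)
        if h < a.2 then (state.set col (row : Int), h) else a
      else a) acc) (state, base)

-- ===== PRECONDITION & SPEC =====
def Spec_get_best_neighbour (state : List Int) (out : List Int × Int) : Prop := out = get_best_neighbour_alt state
instance (state : List Int) (out : List Int × Int) : Decidable (Spec_get_best_neighbour state out) := by unfold Spec_get_best_neighbour; infer_instance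

-- ===== CLAIM (what is proved, stated in full; the proofs are below) =====
def Claim_equal_get_best_neighbour : Prop := ∀ (state : List Int), Dom_get_best_neighbour state → Spec_get_best_neighbour state (get_best_neighbour state)

-- ===== LEMMAS AND PROOFS =====

-- math-side versions of the two counts
def pvInd (s : List Int) (i j : Nat) : Int := if pvCfl (s.getD i 0) (s.getD j 0) i j then 1 else 0

def pvH (s : List Int) : Int :=
  ∑ i ∈ Finset.range s.length, ∑ j ∈ Finset.Ico (i + 1) s.length, pvInd s i j

def pvC (s : List Int) (col : Nat) (v : Int) : Int :=
  ∑ j ∈ Finset.range s.length, if j ≠ col ∧ pvCfl (s.getD j 0) v j col then 1 else 0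

def pvRest (s : List Int) (col : Nat) : Int :=
  ∑ i ∈ Finset.range s.length, ∑ j ∈ Finset.Ico (i + 1) s.length,
    if i ≠ col ∧ j ≠ col then pvInd s i j else 0

theorem pvCfl_symm (a b : Int) (i j : Nat) : pvCfl a b i j = pvCfl b a j i := by
  unfold pvCfl
  have h1 : (a == b) = (b == a) := by simp; exact ⟨fun h => h.symm, fun h => h.symm⟩
  have h2 : (a - b).natAbs = (b - a).natAbs := by omega
  have h3 : ((i:Int) - j).natAbs = ((j:Int) - i).natAbs := by omega
  rw [h1, h2, h3]

theorem countP_range'_sum (a b : Nat) (p : Nat → Bool) :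
    ((List.range' a b).countP p : Int) = ∑ j ∈ Finset.Ico a (a + b), if p j then 1 else 0 := by
  rw [← PySem.List.sum_map_ite_one_zero, Finset.sum_Ico_eq_sum_range, List.range'_eq_map_range,
    List.map_map]
  simp only [add_tsub_cancel_left]
  rfl

theorem countP_range_sum (n : Nat) (p : Nat → Bool) :
    ((List.range n).countP p : Int) = ∑ j ∈ Finset.range n, if p j then 1 else 0 := by
  rw [← PySem.List.sum_map_ite_one_zero]
  rfl

theorem heur_eq (s : List Int) : compute_heurestic s = pvH s := by
  unfold compute_heurestic pvH
  rw [PySem.List.foldl_congr_mem (List.range s.length) _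
    (fun h i => h + (((List.range' (i + 1) (s.length - (i + 1))).countP
      (fun j => pvCfl (s.getD i 0) (s.getD j 0) i j)) : Int)) 0
    (by intro acc x hx; exact PySem.List.foldl_count_if _ _ _)]
  rw [PySem.List.foldl_add]
  show 0 + ∑ i ∈ Finset.range s.length, (((List.range' (i + 1) (s.length - (i + 1))).countP
      (fun j => pvCfl (s.getD i 0) (s.getD j 0) i j)) : Int) = _
  rw [zero_add]
  refine Finset.sum_congr rfl (fun i hi => ?_)
  rw [countP_range'_sum]
  have : i + 1 + (s.length - (i + 1)) = s.length := by
    have := Finset.mem_range.mp hi; omega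
  rw [this]
  unfold pvInd
  rfl

theorem conflicts_eq (s : List Int) (col : Nat) (v : Int) : pvConflicts s col v = pvC s col v := by
  unfold pvConflicts pvC
  rw [PySem.List.foldl_count_if, countP_range_sum, zero_add]
  refine Finset.sum_congr rfl (fun j hj => ?_)
  by_cases h1 : j = col <;> simp [h1]

theorem pvH_set (s : List Int) (col : Nat) (h : col < s.length) (r : Int) :
    pvH (s.set col r) = pvRest s col + pvC s col r := by
  have hlen : (s.set col r).length = s.length := List.length_set ..
  have hgcol : (s.set col r).getD col 0 = r := by
    rw [List.getD_eq_getElem?_getD, List.getElem?_set_self (by omega)]; rfl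
  have hgne : ∀ k, k ≠ col → (s.set col r).getD k 0 = s.getD k 0 := by
    intro k hk
    rw [List.getD_eq_getElem?_getD, List.getElem?_set_ne (fun e => hk e.symm), ← List.getD_eq_getElem?_getD]
  set f : Nat → Int := fun k => if pvCfl (s.getD k 0) r k col then 1 else 0 with hf
  have key : ∀ i ∈ Finset.range s.length, ∀ j ∈ Finset.Ico (i + 1) s.length,
      pvInd (s.set col r) i j = (if i ≠ col ∧ j ≠ col then pvInd s i j else 0)
        + ((if i = col then f j else 0) + (if j = col then f i else 0)) := by
    intro i hi j hj
    have hij : i < j := by have := Finset.mem_Ico.mp hj; omega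
    unfold pvInd
    by_cases hic : i = col
    · subst hic
      have hjc : j ≠ i := by omega
      rw [hgcol, hgne j hjc, pvCfl_symm]
      simp [hjc, hf]
    · by_cases hjc : j = col
      · subst hjc
        rw [hgcol, hgne i hic]
        simp [hic, hf]
      · rw [hgne i hic, hgne j hjc]
        simp [hic, hjc]
  unfold pvH
  rw [hlen]
  rw [Finset.sum_congr rfl (fun i hi => Finset.sum_congr rfl (fun j hj => key i hi j hj))]
  have hsplit : ∀ i ∈ Finset.range s.length,
      (∑ j ∈ Finset.Ico (i + 1) s.length, ((if i ≠ col ∧ j ≠ col then pvInd s i j else 0)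
        + ((if i = col then f j else 0) + (if j = col then f i else 0))))
      = (∑ j ∈ Finset.Ico (i + 1) s.length, if i ≠ col ∧ j ≠ col then pvInd s i j else 0)
        + ((if i = col then ∑ j ∈ Finset.Ico (i + 1) s.length, f j else 0)
          + (if i < col then f i else 0)) := by
    intro i hi
    rw [Finset.sum_add_distrib, Finset.sum_add_distrib]
    congr 1
    congr 1
    · by_cases hic : i = col <;> simp [hic]
    · rw [Finset.sum_ite_eq' (Finset.Ico (i + 1) s.length) col (fun _ => f i)]
      by_cases hlt : i < col
      · rw [if_pos (Finset.mem_Ico.mpr ⟨by omega, h⟩), if_pos hlt]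
      · rw [if_neg (fun hm => hlt (by have := (Finset.mem_Ico.mp hm).1; omega)), if_neg hlt]
  rw [Finset.sum_congr rfl hsplit, Finset.sum_add_distrib, Finset.sum_add_distrib]
  unfold pvRest
  congr 1
  rw [Finset.sum_ite_eq' (Finset.range s.length) col
    (fun i => ∑ j ∈ Finset.Ico (i + 1) s.length, f j), if_pos (Finset.mem_range.mpr h)]
  -- goal: ∑_{Ico (col+1) n} f + ∑_{range n} (if i < col then f i else 0) = pvC s col r
  have h2 : (∑ i ∈ Finset.range s.length, if i < col then f i else 0)
      = ∑ i ∈ Finset.range col, f i := by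
    rw [show (∑ i ∈ Finset.range col, f i)
        = ∑ i ∈ Finset.range col, (if i < col then f i else 0) from
      Finset.sum_congr rfl (fun i hi => (if_pos (Finset.mem_range.mp hi)).symm)]
    exact (Finset.sum_subset (s₁ := Finset.range col) (s₂ := Finset.range s.length) (fun x hx => Finset.mem_range.mpr (lt_of_lt_of_le (Finset.mem_range.mp hx) h.le))
      (fun x hx hnx => if_neg (fun hlt => hnx (Finset.mem_range.mpr hlt)))).symm
  rw [h2]
  unfold pvC
  rw [Finset.range_eq_Ico, ← Finset.sum_Ico_consecutive _ (Nat.zero_le col) (le_of_lt h),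
    Finset.sum_eq_sum_Ico_succ_bot h]
  rw [← Finset.range_eq_Ico]
  have hA : (∑ j ∈ Finset.range col, if j ≠ col ∧ pvCfl (s.getD j 0) r j col then 1 else (0:Int))
      = ∑ j ∈ Finset.range col, f j :=
    Finset.sum_congr rfl (fun j hj => by
      have : j ≠ col := by have := Finset.mem_range.mp hj; omega
      simp [this, hf])
  have hB : (∑ j ∈ Finset.Ico (col+1) s.length, if j ≠ col ∧ pvCfl (s.getD j 0) r j col then 1 else (0:Int))
      = ∑ j ∈ Finset.Ico (col+1) s.length, f j :=
    Finset.sum_congr rfl (fun j hj => by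
      have : j ≠ col := by have := (Finset.mem_Ico.mp hj).1; omega
      simp [this, hf])
  simp only [ne_eq, not_true_eq_false, false_and, if_false, hA, hB]
  ring

theorem inc_eq (s : List Int) (col : Nat) (h : col < s.length) (r : Int) :
    pvH s - pvC s col (s.getD col 0) + pvC s col r = pvH (s.set col r) := by
  have hself : s.set col (s.getD col 0) = s := by
    rw [List.getD_eq_getElem s 0 h]
    exact List.set_getElem_self h
  have e1 := pvH_set s col h (s.getD col 0)
  rw [hself] at e1
  rw [pvH_set s col h r]
  omega

theorem offdiag_double (n : Nat) (G : Nat → Nat → Int) (hsym : ∀ i j, G i j = G j i) :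
    (∑ c ∈ Finset.range n, ∑ j ∈ Finset.range n, if j ≠ c then G j c else 0)
      = 2 * ∑ i ∈ Finset.range n, ∑ j ∈ Finset.Ico (i + 1) n, G i j := by
  induction n with
  | zero => simp
  | succ n ih =>
    rw [Finset.sum_range_succ (f := fun c => ∑ j ∈ Finset.range (n+1), if j ≠ c then G j c else 0)]
    have hlast : (∑ j ∈ Finset.range (n+1), if j ≠ n then G j n else 0)
        = ∑ j ∈ Finset.range n, G j n := by
      rw [Finset.sum_range_succ]
      simp only [ne_eq, not_true_eq_false, if_false, add_zero]
      exact Finset.sum_congr rfl (fun j hj => if_pos (by have := Finset.mem_range.mp hj; omega))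
    have hmid : ∀ c ∈ Finset.range n, (∑ j ∈ Finset.range (n+1), if j ≠ c then G j c else 0)
        = (∑ j ∈ Finset.range n, if j ≠ c then G j c else 0) + G n c := by
      intro c hc
      rw [Finset.sum_range_succ, if_pos (by have := Finset.mem_range.mp hc; omega)]
    rw [Finset.sum_congr rfl hmid, Finset.sum_add_distrib, hlast, ih]
    have hR : (∑ i ∈ Finset.range (n+1), ∑ j ∈ Finset.Ico (i + 1) (n+1), G i j)
        = (∑ i ∈ Finset.range n, ∑ j ∈ Finset.Ico (i + 1) n, G i j)
          + ∑ i ∈ Finset.range n, G i n := by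
      rw [Finset.sum_range_succ, Finset.Ico_self, Finset.sum_empty, add_zero]
      rw [Finset.sum_congr rfl (fun i hi => Finset.sum_Ico_succ_top
        (by have := Finset.mem_range.mp hi; omega) _), Finset.sum_add_distrib]
    rw [hR]
    have hflip : (∑ c ∈ Finset.range n, G n c) = ∑ c ∈ Finset.range n, G c n :=
      Finset.sum_congr rfl (fun c _ => hsym n c)
    rw [hflip]
    ring

theorem base_eq (s : List Int) :
    PySem.Int.floordiv (((List.range s.length).map
      (fun col => pvConflicts s col (s.getD col 0))).sum) 2 = compute_heurestic s := by
  have hsum : (((List.range s.length).map (fun col => pvConflicts s col (s.getD col 0))).sum)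
      = ∑ c ∈ Finset.range s.length, pvConflicts s c (s.getD c 0) := rfl
  have hstep : (∑ c ∈ Finset.range s.length, pvConflicts s c (s.getD c 0))
      = ∑ c ∈ Finset.range s.length, ∑ j ∈ Finset.range s.length,
          if j ≠ c then pvInd s j c else 0 := by
    refine Finset.sum_congr rfl (fun c _ => ?_)
    rw [conflicts_eq]
    unfold pvC pvInd
    refine Finset.sum_congr rfl (fun j _ => ?_)
    by_cases h1 : j = c <;> simp [h1]
  have hsymInd : ∀ i j, pvInd s i j = pvInd s j i := by
    intro i j; unfold pvInd; rw [pvCfl_symm]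
  rw [hsum, hstep, offdiag_double s.length (pvInd s) hsymInd]
  rw [heur_eq]
  rw [PySem.Int.floordiv_eq_ediv_of_pos (by norm_num)]
  exact Int.mul_ediv_cancel_left _ (by norm_num)

-- proof-only step functions, definitionally equal to the loop bodies of the two ports
def pvStepA (col : Nat) (o : Int) (a : List Int × List Int × Int) (row : Nat) :
    List Int × List Int × Int :=
  if (row : Int) ≠ o then
    (if compute_heurestic (a.1.set col (row : Int)) < a.2.2 then
      (a.1.set col (row : Int), a.1.set col (row : Int), compute_heurestic (a.1.set col (row : Int)))
    else (a.1.set col (row : Int), a.2.1, a.2.2))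
  else a

def pvOutA (n : Nat) (acc : List Int × List Int × Int) (col : Nat) :
    List Int × List Int × Int :=
  (((List.range n).foldl (pvStepA col (acc.1.getD col 0)) acc).1.set col (acc.1.getD col 0),
   ((List.range n).foldl (pvStepA col (acc.1.getD col 0)) acc).2.1,
   ((List.range n).foldl (pvStepA col (acc.1.getD col 0)) acc).2.2)

def pvFref (s : List Int) (col : Nat) (o : Int) (b : List Int × Int) (row : Nat) :
    List Int × Int :=
  if (row : Int) ≠ o then
    (if compute_heurestic (s.set col (row : Int)) < b.2 then
      (s.set col (row : Int), compute_heurestic (s.set col (row : Int)))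
    else b)
  else b

def pvRefOut (s : List Int) (b : List Int × Int) (col : Nat) : List Int × Int :=
  (List.range s.length).foldl (pvFref s col (s.getD col 0)) b

def pvStepB (s : List Int) (base : Int) (col : Nat) (a : List Int × Int) (row : Nat) :
    List Int × Int :=
  if (row : Int) ≠ s.getD col 0 then
    (if base - pvConflicts s col (s.getD col 0) + pvConflicts s col (row : Int) < a.2 then
      (s.set col (row : Int), base - pvConflicts s col (s.getD col 0) + pvConflicts s col (row : Int))
    else a)
  else a

def pvOutB (s : List Int) (base : Int) (acc : List Int × Int) (col : Nat) : List Int × Int :=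
  (List.range s.length).foldl (pvStepB s base col) acc

theorem A_inner (s : List Int) (col : Nat) (o : Int) (rows : List Nat)
    (st best : List Int) (mh : Int) (hst : ∀ v, st.set col v = s.set col v) :
    rows.foldl (pvStepA col o) (st, best, mh)
      = ((rows.foldl (pvStepA col o) (st, best, mh)).1,
         rows.foldl (pvFref s col o) (best, mh))
    ∧ ∀ v, ((rows.foldl (pvStepA col o) (st, best, mh)).1).set col v = s.set col v := by
  induction rows generalizing st best mh with
  | nil => exact ⟨rfl, hst⟩
  | cons row rows ih =>
    rw [List.foldl_cons, List.foldl_cons]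
    have hst' : ∀ v, ((s.set col (row : Int)).set col v) = s.set col v :=
      fun v => List.set_set ..
    by_cases hrow : (row : Int) ≠ o
    · by_cases hlt : compute_heurestic (s.set col (row : Int)) < mh
      · have hA : pvStepA col o (st, best, mh) row
            = (s.set col (row : Int), s.set col (row : Int), compute_heurestic (s.set col (row : Int))) := by
          show (if (row : Int) ≠ o then
              (if compute_heurestic (st.set col (row : Int)) < mh then
                (st.set col (row : Int), st.set col (row : Int), compute_heurestic (st.set col (row : Int)))
              else (st.set col (row : Int), best, mh))
            else (st, best, mh)) = _
          rw [hst, if_pos hrow, if_pos hlt]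
        have hR : pvFref s col o (best, mh) row
            = (s.set col (row : Int), compute_heurestic (s.set col (row : Int))) := by
          show (if (row : Int) ≠ o then
              (if compute_heurestic (s.set col (row : Int)) < mh then
                (s.set col (row : Int), compute_heurestic (s.set col (row : Int)))
              else (best, mh))
            else (best, mh)) = _
          rw [if_pos hrow, if_pos hlt]
        rw [hA, hR]
        exact ih (s.set col (row : Int)) (s.set col (row : Int))
          (compute_heurestic (s.set col (row : Int))) hst'
      · have hA : pvStepA col o (st, best, mh) row
            = (s.set col (row : Int), best, mh) := by
          show (if (row : Int) ≠ o then
              (if compute_heurestic (st.set col (row : Int)) < mh then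
                (st.set col (row : Int), st.set col (row : Int), compute_heurestic (st.set col (row : Int)))
              else (st.set col (row : Int), best, mh))
            else (st, best, mh)) = _
          rw [hst, if_pos hrow, if_neg hlt]
        have hR : pvFref s col o (best, mh) row = (best, mh) := by
          show (if (row : Int) ≠ o then
              (if compute_heurestic (s.set col (row : Int)) < mh then
                (s.set col (row : Int), compute_heurestic (s.set col (row : Int)))
              else (best, mh))
            else (best, mh)) = _
          rw [if_pos hrow, if_neg hlt]
        rw [hA, hR]
        exact ih (s.set col (row : Int)) best mh hst'
    · have hA : pvStepA col o (st, best, mh) row = (st, best, mh) := if_neg hrow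
      have hR : pvFref s col o (best, mh) row = (best, mh) := if_neg hrow
      rw [hA, hR]
      exact ih st best mh hst

theorem A_outer (s : List Int) (cols : List Nat) (hcols : ∀ c ∈ cols, c < s.length)
    (best : List Int) (mh : Int) :
    cols.foldl (pvOutA s.length) (s, best, mh)
      = (s, cols.foldl (pvRefOut s) (best, mh)) := by
  induction cols generalizing best mh with
  | nil => rfl
  | cons col cols ih =>
    have hcol : col < s.length := hcols col (List.mem_cons_self ..)
    rw [List.foldl_cons, List.foldl_cons]
    have hA := A_inner s col (s.getD col 0) (List.range s.length) s best mh (fun _ => rfl)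
    have hself : s.set col (s.getD col 0) = s := by
      rw [List.getD_eq_getElem s 0 hcol]
      exact List.set_getElem_self hcol
    have hout : pvOutA s.length (s, best, mh) col = (s, pvRefOut s (best, mh) col) := by
      show ((((List.range s.length).foldl (pvStepA col (s.getD col 0)) (s, best, mh)).1.set col (s.getD col 0),
        ((List.range s.length).foldl (pvStepA col (s.getD col 0)) (s, best, mh)).2.1,
        ((List.range s.length).foldl (pvStepA col (s.getD col 0)) (s, best, mh)).2.2)) = _
      rw [hA.2 (s.getD col 0), hself]
      conv_lhs => rw [hA.1]
      rfl
    rw [hout]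
    exact ih (fun c hc => hcols c (List.mem_cons_of_mem _ hc)) _ _

theorem B_eq_ref (s : List Int) (cols : List Nat) (hcols : ∀ c ∈ cols, c < s.length)
    (b0 : List Int × Int) :
    cols.foldl (pvOutB s (compute_heurestic s)) b0 = cols.foldl (pvRefOut s) b0 := by
  induction cols generalizing b0 with
  | nil => rfl
  | cons col cols ih =>
    have hcol : col < s.length := hcols col (List.mem_cons_self ..)
    rw [List.foldl_cons, List.foldl_cons]
    have hstep : pvStepB s (compute_heurestic s) col = pvFref s col (s.getD col 0) := by
      funext a row
      unfold pvStepB pvFref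
      rw [heur_eq, conflicts_eq, conflicts_eq, inc_eq s col hcol, ← heur_eq]
    have hout : pvOutB s (compute_heurestic s) b0 col = pvRefOut s b0 col := by
      unfold pvOutB pvRefOut
      rw [hstep]
    rw [hout]
    exact ih (fun c hc => hcols c (List.mem_cons_of_mem _ hc)) _

-- ===== VERDICT (by name: the statement is the Claim_ definition above) =====
theorem get_best_neighbour_spec : Claim_equal_get_best_neighbour := by
  intro s _
  unfold Spec_get_best_neighbour
  have hA : get_best_neighbour s
      = (((List.range s.length).foldl (pvOutA s.length) (s, s, compute_heurestic s)).2.1,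
         ((List.range s.length).foldl (pvOutA s.length) (s, s, compute_heurestic s)).2.2) := by
    unfold get_best_neighbour pvOutA pvStepA
    rfl
  have hB : get_best_neighbour_alt s
      = (List.range s.length).foldl
          (pvOutB s (PySem.Int.floordiv (((List.range s.length).map
            (fun col => pvConflicts s col (s.getD col 0))).sum) 2))
          (s, PySem.Int.floordiv (((List.range s.length).map
            (fun col => pvConflicts s col (s.getD col 0))).sum) 2) := rfl
  rw [hA, hB, base_eq,
    A_outer s (List.range s.length) (fun c hc => List.mem_range.mp hc) s (compute_heurestic s),
    B_eq_ref s (List.range s.length) (fun c hc => List.mem_range.mp hc)]
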